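-- pv_equiv track=rewrite | github.com/leandrolma3/DSL-GA | verificar_todos_drifts.py | calculate_drift_positions
-- ===== SOURCE A (Python) =====
-- CHUNK_SIZE = 1000
--
-- def calculate_drift_positions(concept_sequence, gradual_width=0):
--     """Calcula posicoes de drift baseado na sequencia de conceitos"""
--     drifts = []
--     current_instance = 0
--
--     for i, concept in enumerate(concept_sequence[:-1]):  # Exceto ultimo
--         duration = concept['duration_chunks']
--         current_instance += duration * CHUNK_SIZE
--
--         # Drift comeca aqui
--         drift_start = current_instance
--         drift_end = current_instance + (gradual_width * CHUNK_SIZE)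
--
--         drifts.append({
--             'position': drift_start,
--             'end': drift_end if gradual_width > 0 else drift_start,
--             'width': gradual_width,
--             'before': concept_sequence[i]['concept_id'],
--             'after': concept_sequence[i+1]['concept_id']
--         })
--
--         current_instance = drift_end if gradual_width > 0 else drift_start
--
--     return drifts, current_instance
-- ===== SOURCE B (Python) =====
-- CHUNK_SIZE = 1000
--
-- def calculate_drift_positions(concept_sequence, gradual_width=0):
--     """Calcula posicoes de drift baseado na sequencia de conceitos"""
--     step = gradual_width * CHUNK_SIZE if gradual_width > 0 else 0
--     # pass 1: prefix-sum table of cumulative durations (in instances)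
--     prefix = []
--     total = 0
--     for c in concept_sequence[:-1]:
--         total += c['duration_chunks'] * CHUNK_SIZE
--         prefix.append(total)
--     # each drift start = cumulative duration + widths of the drifts before it
--     starts = [p + i * step for i, p in enumerate(prefix)]
--     # pass 2: build drift dicts from the table and adjacent concept pairs
--     drifts = [{'position': s,
--                'end': s + step,
--                'width': gradual_width,
--                'before': a['concept_id'],
--                'after': b['concept_id']}
--               for s, a, b in zip(starts, concept_sequence, concept_sequence[1:])]
--     current = starts[-1] + step if starts else 0
--     return drifts, current
-- ===== Notes on version B (the rewrite author's own statement) =====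
-- stated objective: alternative
-- what changed: Replaces A's single stateful loop (carrying current_instance and indexing back into the list) by a table-then-build decomposition: a prefix-sum pass over durations, a starts table adding i*step, and a zip over adjacent concept pairs; the final current_instance is read off the last table entry.
import Mathlib
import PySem

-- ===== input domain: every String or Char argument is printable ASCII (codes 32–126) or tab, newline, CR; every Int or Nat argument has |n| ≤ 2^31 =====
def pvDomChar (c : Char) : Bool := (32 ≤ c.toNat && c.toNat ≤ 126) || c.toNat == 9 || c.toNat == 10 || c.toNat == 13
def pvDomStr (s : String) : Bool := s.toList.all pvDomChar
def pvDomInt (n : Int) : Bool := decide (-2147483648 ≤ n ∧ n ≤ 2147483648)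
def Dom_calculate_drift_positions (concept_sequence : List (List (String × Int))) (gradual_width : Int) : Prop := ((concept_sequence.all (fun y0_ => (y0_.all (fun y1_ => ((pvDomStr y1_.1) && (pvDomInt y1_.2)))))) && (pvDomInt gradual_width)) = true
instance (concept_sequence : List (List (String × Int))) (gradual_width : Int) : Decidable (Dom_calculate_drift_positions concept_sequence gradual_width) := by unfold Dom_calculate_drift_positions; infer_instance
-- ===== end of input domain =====

-- B replaces A's single stateful loop by a table-then-build decomposition (prefix sums,
-- then zip with adjacent pairs); same cost, alternative structure.

-- shared primitive: Python's d[key] lookup on an association-list dict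
-- (default 0 is never reached inside Pre_, which requires the key to be present)
def pvGetKey (d : List (String × Int)) (k : String) : Int :=
  ((PySem.Dict.mk d).get? k).getD 0

-- ===== PORT A =====
-- transliteration of A: one fold over enumerate(concept_sequence[:-1]) carrying (drifts, current_instance)
def calculate_drift_positions (concept_sequence : List (List (String × Int))) (gradual_width : Int) : (List (List (String × Int))) × Int :=
  (PySem.List.enumerate (PySem.List.slice concept_sequence none (some (-1))) 0).foldl
    (fun st p =>
      let i := p.1
      let concept := p.2
      let duration := pvGetKey concept "duration_chunks"
      let current_instance := st.2 + duration * 1000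
      let drift_start := current_instance
      let drift_end := current_instance + gradual_width * 1000
      let entry : List (String × Int) :=
        [("position", drift_start),
         ("end", if gradual_width > 0 then drift_end else drift_start),
         ("width", gradual_width),
         ("before", pvGetKey ((PySem.List.pyGet? concept_sequence i).getD []) "concept_id"),
         ("after", pvGetKey ((PySem.List.pyGet? concept_sequence (i + 1)).getD []) "concept_id")]
      (st.1 ++ [entry], if gradual_width > 0 then drift_end else drift_start))
    ([], 0)

-- ===== PORT B =====
-- transliteration of B: prefix-sum table, starts table, then zip with adjacent pairs
def calculate_drift_positions_alt (concept_sequence : List (List (String × Int))) (gradual_width : Int) : (List (List (String × Int))) × Int :=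
  let step : Int := if gradual_width > 0 then gradual_width * 1000 else 0
  let prefixTbl : List Int :=
    ((PySem.List.slice concept_sequence none (some (-1))).foldl
      (fun (st : List Int × Int) c =>
        let total := st.2 + pvGetKey c "duration_chunks" * 1000
        (st.1 ++ [total], total)) ([], 0)).1
  let starts : List Int := (PySem.List.enumerate prefixTbl 0).map (fun p => p.2 + p.1 * step)
  let drifts : List (List (String × Int)) :=
    (starts.zip (concept_sequence.zip concept_sequence.tail)).map
      (fun q =>
        [("position", q.1),
         ("end", q.1 + step),
         ("width", gradual_width),
         ("before", pvGetKey q.2.1 "concept_id"),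
         ("after", pvGetKey q.2.2 "concept_id")])
  let current : Int := if starts ≠ [] then (PySem.List.pyGet? starts (-1)).getD 0 + step else 0
  (drifts, current)

-- ===== PRECONDITION & SPEC =====
-- Pre_ excludes exactly the inputs where Python A raises KeyError: every concept except the
-- last needs 'duration_chunks', and (when the loop runs at all) every concept needs 'concept_id'.
def Pre_calculate_drift_positions (concept_sequence : List (List (String × Int))) (gradual_width : Int) : Prop :=
  (∀ d ∈ concept_sequence.dropLast, (PySem.Dict.mk d).contains "duration_chunks" = true) ∧
  (2 ≤ concept_sequence.length → ∀ d ∈ concept_sequence, (PySem.Dict.mk d).contains "concept_id" = true)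
instance (concept_sequence : List (List (String × Int))) (gradual_width : Int) : Decidable (Pre_calculate_drift_positions concept_sequence gradual_width) := by unfold Pre_calculate_drift_positions; infer_instance

def pvWitness_calculate_drift_positions : (List (List (String × Int))) × Int :=
  ([[("concept_id", 1), ("duration_chunks", 2)], [("concept_id", 2), ("duration_chunks", 3)]], 1)

def Spec_calculate_drift_positions (concept_sequence : List (List (String × Int))) (gradual_width : Int) (out : (List (List (String × Int))) × Int) : Prop := out = calculate_drift_positions_alt concept_sequence gradual_width
instance (concept_sequence : List (List (String × Int))) (gradual_width : Int) (out : (List (List (String × Int))) × Int) : Decidable (Spec_calculate_drift_positions concept_sequence gradual_width out) := by unfold Spec_calculate_drift_positions; infer_instance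

-- ===== CLAIM (what is proved, stated in full; the proofs are below) =====
def Claim_equal_calculate_drift_positions : Prop := ∀ (concept_sequence : List (List (String × Int))) (gradual_width : Int), Dom_calculate_drift_positions concept_sequence gradual_width → Pre_calculate_drift_positions concept_sequence gradual_width → Spec_calculate_drift_positions concept_sequence gradual_width (calculate_drift_positions concept_sequence gradual_width)

-- ===== LEMMAS AND PROOFS =====

-- reference recursion over adjacent pairs, used to bridge the two ports
def pvSpine (gw : Int) : List (List (String × Int) × List (String × Int)) → Int → (List (List (String × Int))) × Int
  | [], cur => ([], cur)
  | (a, b) :: ps, cur =>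
      let s := cur + pvGetKey a "duration_chunks" * 1000
      let e := if gw > 0 then s + gw * 1000 else s
      let entry : List (String × Int) :=
        [("position", s),
         ("end", e),
         ("width", gw),
         ("before", pvGetKey a "concept_id"),
         ("after", pvGetKey b "concept_id")]
      let r := pvSpine gw ps e
      (entry :: r.1, r.2)

theorem pvA_eq_spine (gw : Int) :
    ∀ (l rest : List (List (String × Int))) (full : List (List (String × Int))) (j : Nat)
      (acc : List (List (String × Int))) (cur : Int),
      rest ≠ [] → full.drop j = l ++ rest →
      (PySem.List.enumerate l (j : Int)).foldl
        (fun st p =>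
          let i := p.1
          let concept := p.2
          let duration := pvGetKey concept "duration_chunks"
          let current_instance := st.2 + duration * 1000
          let drift_start := current_instance
          let drift_end := current_instance + gw * 1000
          let entry : List (String × Int) :=
            [("position", drift_start),
             ("end", if gw > 0 then drift_end else drift_start),
             ("width", gw),
             ("before", pvGetKey ((PySem.List.pyGet? full i).getD []) "concept_id"),
             ("after", pvGetKey ((PySem.List.pyGet? full (i + 1)).getD []) "concept_id")]
          (st.1 ++ [entry], if gw > 0 then drift_end else drift_start))
        (acc, cur)
      = (acc ++ (pvSpine gw (l.zip (l.tail ++ rest)) cur).1,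
         (pvSpine gw (l.zip (l.tail ++ rest)) cur).2) := by
  intro l
  induction l with
  | nil =>
    intro rest full j acc cur hrest hdrop
    simp [PySem.List.enumerate_nil, pvSpine]
  | cons c l' ih =>
    intro rest full j acc cur hrest hdrop
    have hget0 : full[j]? = some c := by
      have h : (full.drop j)[0]? = some c := by rw [hdrop]; rfl
      simpa [List.getElem?_drop] using h
    have hdrop1 : full.drop (j + 1) = l' ++ rest := by
      have : full.drop (j + 1) = (full.drop j).drop 1 := by
        rw [List.drop_drop]
      rw [this, hdrop]
      simp
    obtain ⟨y, ys, hys⟩ : ∃ y ys, l' ++ rest = y :: ys := by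
      cases h : l' ++ rest with
      | nil => exact absurd (List.append_eq_nil_iff.mp h).2 hrest
      | cons y ys => exact ⟨y, ys, rfl⟩
    have hget1 : full[j + 1]? = some y := by
      have h : (full.drop (j + 1))[0]? = some y := by rw [hdrop1, hys]; rfl
      simpa [List.getElem?_drop] using h
    have hzip : (c :: l').zip ((c :: l').tail ++ rest) = (c, y) :: l'.zip (l'.tail ++ rest) := by
      cases l' with
      | nil =>
        simp at hys
        simp [hys]
      | cons d l'' =>
        simp at hys
        simp [hys.1]
    rw [PySem.List.enumerate_cons, List.foldl_cons]
    have hcast : (j : Int) + 1 = ((j + 1 : Nat) : Int) := by push_cast; ring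
    simp only [hcast]
    rw [ih rest full (j + 1) _ _ hrest hdrop1]
    simp only [hzip, pvSpine, PySem.List.pyGet?_natCast, hget0, hget1, Option.getD_some]
    simp

-- prefix-sum table as a structural recursion (proof-side view of B's first pass)
def pvPrefixFrom (t : Int) : List (List (String × Int)) → List Int
  | [] => []
  | c :: l =>
      (t + pvGetKey c "duration_chunks" * 1000) ::
        pvPrefixFrom (t + pvGetKey c "duration_chunks" * 1000) l

theorem pvPrefix_fold (l : List (List (String × Int))) :
    ∀ (acc : List Int) (t : Int),
      (l.foldl
        (fun (st : List Int × Int) c =>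
          let total := st.2 + pvGetKey c "duration_chunks" * 1000
          (st.1 ++ [total], total)) (acc, t)).1 = acc ++ pvPrefixFrom t l := by
  induction l with
  | nil => intro acc t; simp [pvPrefixFrom]
  | cons c l ih => intro acc t; simp [pvPrefixFrom, ih]

theorem pvB_eq_spine (gw : Int) :
    ∀ (pairs : List (List (String × Int) × List (String × Int))) (t : Int) (k : Nat),
      pvSpine gw pairs (t + k * (if gw > 0 then gw * 1000 else 0)) =
        ((((PySem.List.enumerate (pvPrefixFrom t (pairs.map Prod.fst)) (k : Int)).map
            (fun p => p.2 + p.1 * (if gw > 0 then gw * 1000 else 0))).zip pairs).map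
          (fun q =>
            [("position", q.1),
             ("end", q.1 + (if gw > 0 then gw * 1000 else 0)),
             ("width", gw),
             ("before", pvGetKey q.2.1 "concept_id"),
             ("after", pvGetKey q.2.2 "concept_id")]),
         ((((PySem.List.enumerate (pvPrefixFrom t (pairs.map Prod.fst)) (k : Int)).map
            (fun p => p.2 + p.1 * (if gw > 0 then gw * 1000 else 0))).getLast?.map
              (· + (if gw > 0 then gw * 1000 else 0))).getD
            (t + k * (if gw > 0 then gw * 1000 else 0)))) := by
  intro pairs
  induction pairs with
  | nil => intro t k; simp [pvPrefixFrom, PySem.List.enumerate_nil, pvSpine]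
  | cons ab ps ih =>
    intro t k
    obtain ⟨a, b⟩ := ab
    have hstep : ∀ s : Int, (if gw > 0 then s + gw * 1000 else s) =
        s + (if gw > 0 then gw * 1000 else 0) := by
      intro s; by_cases h : gw > 0 <;> simp [h]
    simp only [List.map_cons, pvPrefixFrom, PySem.List.enumerate_cons, pvSpine]
    have hcast : (k : Int) + 1 = ((k + 1 : Nat) : Int) := by push_cast; ring
    have harg : (if gw > 0 then (t + k * (if gw > 0 then gw * 1000 else 0)) + pvGetKey a "duration_chunks" * 1000 + gw * 1000
        else (t + k * (if gw > 0 then gw * 1000 else 0)) + pvGetKey a "duration_chunks" * 1000) =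
        (t + pvGetKey a "duration_chunks" * 1000) + (k + 1 : Nat) * (if gw > 0 then gw * 1000 else 0) := by
      rw [hstep]; push_cast; ring
    rw [harg, ih (t + pvGetKey a "duration_chunks" * 1000) (k + 1)]
    simp only [hcast, List.map_cons, List.zip_cons_cons, Prod.mk.injEq]
    refine ⟨?_, ?_⟩
    · simp only [List.cons.injEq, Prod.mk.injEq]
      and_intros
      all_goals (push_cast; try ring)
    · cases hl : ((PySem.List.enumerate (pvPrefixFrom (t + pvGetKey a "duration_chunks" * 1000) (ps.map Prod.fst)) ((k + 1 : Nat) : Int)).map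
          (fun p => p.2 + p.1 * (if gw > 0 then gw * 1000 else 0))) with
      | nil =>
        simp only [List.getLast?_nil, List.getLast?_singleton, Option.map_none, Option.map_some, Option.getD_none, Option.getD_some]
        push_cast; ring
      | cons z zs => simp [List.getLast?_cons]

-- the two zip-shape facts about adjacent pairs
theorem pvZipTakeLeft {α β : Type} : ∀ (l : List α) (k : Nat) (l' : List β),
    l'.length ≤ k → (l.take k).zip l' = l.zip l'
  | [], _, _, _ => by simp
  | _ :: _, _, [], _ => by simp
  | a :: l, k + 1, b :: l', h => by
    simp only [List.take_succ_cons, List.zip_cons_cons]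
    rw [pvZipTakeLeft l k l' (by simpa using h)]
  | _ :: _, 0, _ :: _, h => by simp at h

theorem pvZip_dropLast {α : Type} : ∀ (cs : List α) (h : cs ≠ []),
    cs.dropLast.zip (cs.dropLast.tail ++ [cs.getLast h]) = cs.zip cs.tail
  | [], h => absurd rfl h
  | [a], _ => by simp
  | a :: b :: r, _ => by
    have h2 : (b :: r) ≠ [] := by simp
    have hd : ((a :: b :: r).dropLast).tail ++ [(a :: b :: r).getLast (by simp)] = b :: r := by
      simp only [List.dropLast_cons₂, List.tail_cons, List.getLast_cons h2]
      exact List.dropLast_append_getLast h2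
    rw [hd]
    have ht : (a :: b :: r).dropLast = (a :: b :: r).take ((b :: r).length) := by
      simp [List.dropLast_eq_take]
    rw [ht, pvZipTakeLeft _ _ _ (by simp), List.tail_cons]

theorem pvMap_fst_zip_tail {α : Type} : ∀ (cs : List α),
    (cs.zip cs.tail).map Prod.fst = cs.dropLast
  | [] => by simp
  | [a] => by simp
  | a :: b :: r => by
    simpa using pvMap_fst_zip_tail (b :: r)

theorem pv_main (cs : List (List (String × Int))) (gw : Int) :
    calculate_drift_positions cs gw = calculate_drift_positions_alt cs gw := by
  by_cases h : cs = []
  · subst h; rfl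
  · have hsplit : cs.drop 0 = cs.dropLast ++ [cs.getLast h] := by
      simpa using (List.dropLast_append_getLast h).symm
    have hA := pvA_eq_spine gw cs.dropLast [cs.getLast h] cs 0 [] 0 (by simp) hsplit
    rw [pvZip_dropLast cs h] at hA
    have hB := pvB_eq_spine gw (cs.zip cs.tail) 0 0
    unfold calculate_drift_positions calculate_drift_positions_alt
    rw [PySem.List.slice_to_neg_one]
    simp only [Nat.cast_zero] at hA
    rw [hA]
    simp only [pvPrefix_fold, List.nil_append]
    rw [show cs.dropLast = (cs.zip cs.tail).map Prod.fst from (pvMap_fst_zip_tail cs).symm]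
    simp only [Nat.cast_zero, zero_mul, add_zero] at hB
    rw [hB]
    simp only [PySem.List.pyGet?_neg_one]
    cases hs : ((PySem.List.enumerate (pvPrefixFrom 0 ((cs.zip cs.tail).map Prod.fst)) (0 : Int)).map
        (fun p => p.2 + p.1 * (if gw > 0 then gw * 1000 else 0))) with
    | nil => simp
    | cons z zs =>
      simp only [ne_eq, reduceCtorEq, not_false_iff, if_true]
      cases hzl : (z :: zs).getLast? with
      | none => simp at hzl
      | some x => simp

-- ===== VERDICT (by name: the statement is the Claim_ definition above) =====
theorem calculate_drift_positions_spec : Claim_equal_calculate_drift_positions := by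
  intro cs gw _ _
  unfold Spec_calculate_drift_positions
  exact pv_main cs gw
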